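-- pv_equiv track=rewrite | github.com/doctordebug/Hackerpraktikum | Aufgabe_2/Aufgabe_2_4/fast_attack.py | handle_strong_key_bytes
-- ===== SOURCE A (Python) =====
-- def handle_strong_key_bytes(i, key, n=256):
--     corrected_bytes = []
--     arithmetic_sum = 0
--     corrected_bytes.append((-3 - i - arithmetic_sum) % n)
--     for l in range(i):
--         result = 0
--         for j in range(l, i):
--             result += key[j] + 3 + j
--         corrected_bytes.append((-3 - i - result) % n)
--     return corrected_bytes
-- ===== SOURCE B (Python) =====
-- def handle_strong_key_bytes(i, key, n=256):
--     # One backward pass: maintain the suffix sum incrementally instead of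
--     # recomputing sum(key[j] + 3 + j for j in range(l, i)) for every l.
--     out = []
--     running = 0
--     for l in range(i - 1, -1, -1):
--         running += key[l] + 3 + l
--         out.append((-3 - i - running) % n)
--     out.reverse()
--     return [(-3 - i) % n] + out
-- ===== Notes on version B (the rewrite author's own statement) =====
-- stated objective: faster
-- what changed: Replaces the nested loops (recomputing the suffix sum of key[j]+3+j from scratch for every l) by a single backward pass that maintains the running suffix sum incrementally and builds the list back-to-front.
import Mathlib
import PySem

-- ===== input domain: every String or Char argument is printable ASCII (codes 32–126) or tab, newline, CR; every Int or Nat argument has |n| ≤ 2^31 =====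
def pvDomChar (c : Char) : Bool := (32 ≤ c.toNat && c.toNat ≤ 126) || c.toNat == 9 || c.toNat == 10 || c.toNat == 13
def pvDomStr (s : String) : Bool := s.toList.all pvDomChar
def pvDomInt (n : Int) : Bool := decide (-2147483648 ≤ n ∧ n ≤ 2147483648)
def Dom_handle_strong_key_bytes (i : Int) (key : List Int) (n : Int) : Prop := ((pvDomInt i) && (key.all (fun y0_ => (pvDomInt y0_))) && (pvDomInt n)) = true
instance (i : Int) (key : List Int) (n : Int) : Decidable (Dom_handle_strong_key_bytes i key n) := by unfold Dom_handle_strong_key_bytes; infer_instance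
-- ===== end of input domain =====

-- B replaces A's nested O(i^2) loops by one backward pass maintaining the suffix sum incrementally (objective: faster).

-- ===== PORT A =====
def handle_strong_key_bytes (i : Int) (key : List Int) (n : Int) : List Int :=
  -- corrected_bytes = [(-3 - i - 0) % n]; for l in range(i): result = sum over range(l, i); append
  let corrected_bytes : List Int := [PySem.Int.mod (-3 - i - 0) n]
  (PySem.List.pyRange 0 i 1).foldl (fun acc l =>
      let result := (PySem.List.pyRange l i 1).foldl
        (fun r j => r + (PySem.List.pyGetD key j 0 + 3 + j)) 0
      acc ++ [PySem.Int.mod (-3 - i - result) n]) corrected_bytes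

-- ===== PORT B =====
def handle_strong_key_bytes_alt (i : Int) (key : List Int) (n : Int) : List Int :=
  -- out, running = [], 0; for l in range(i-1, -1, -1): running += key[l]+3+l; out.append(...); out.reverse(); [first] + out
  let st := (PySem.List.pyRange (i - 1) (-1) (-1)).foldl
      (fun (p : List Int × Int) l =>
        let running := p.2 + (PySem.List.pyGetD key l 0 + 3 + l)
        (p.1 ++ [PySem.Int.mod (-3 - i - running) n], running)) ([], 0)
  [PySem.Int.mod (-3 - i) n] ++ st.1.reverse

-- ===== PRECONDITION & SPEC =====
-- Pre_ excludes exactly the inputs where Python A raises: n = 0 (ZeroDivisionError in '%')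
-- and i > len(key) (IndexError on key[j]).
def Pre_handle_strong_key_bytes (i : Int) (key : List Int) (n : Int) : Prop :=
  n ≠ 0 ∧ i ≤ (key.length : Int)
instance (i : Int) (key : List Int) (n : Int) : Decidable (Pre_handle_strong_key_bytes i key n) := by
  unfold Pre_handle_strong_key_bytes; infer_instance
def pvWitness_handle_strong_key_bytes : Int × List Int × Int := (3, [1, 2, 3], 256)
def Spec_handle_strong_key_bytes (i : Int) (key : List Int) (n : Int) (out : List Int) : Prop := out = handle_strong_key_bytes_alt i key n
instance (i : Int) (key : List Int) (n : Int) (out : List Int) : Decidable (Spec_handle_strong_key_bytes i key n out) := by unfold Spec_handle_strong_key_bytes; infer_instance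

-- ===== CLAIM (what is proved, stated in full; the proofs are below) =====
def Claim_equal_handle_strong_key_bytes : Prop := ∀ (i : Int) (key : List Int) (n : Int), Dom_handle_strong_key_bytes i key n → Pre_handle_strong_key_bytes i key n → Spec_handle_strong_key_bytes i key n (handle_strong_key_bytes i key n)

-- ===== LEMMAS AND PROOFS =====

-- the suffix sum A's inner loop computes at index l
def pvS (i : Int) (key : List Int) (l : Int) : Int :=
  (((PySem.List.pyRange l i 1).map (fun j => PySem.List.pyGetD key j 0 + 3 + j)).sum)

theorem pvS_cons (i : Int) (key : List Int) (l : Int) (h : l < i) :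
    pvS i key l = (PySem.List.pyGetD key l 0 + 3 + l) + pvS i key (l + 1) := by
  unfold pvS
  rw [PySem.List.pyRange_one_cons h]
  simp

-- A in closed form: head followed by the map of suffix sums over range(i)
theorem portA_eq (i : Int) (key : List Int) (n : Int) :
    handle_strong_key_bytes i key n =
      PySem.Int.mod (-3 - i) n ::
        (PySem.List.pyRange 0 i 1).map (fun l => PySem.Int.mod (-3 - i - pvS i key l) n) := by
  unfold handle_strong_key_bytes
  rw [PySem.List.foldl_append_singleton_eq_map
        (f := fun l => PySem.Int.mod (-3 - i -
          ((PySem.List.pyRange l i 1).foldl (fun r j => r + (PySem.List.pyGetD key j 0 + 3 + j)) 0)) n)]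
  have hinner : ∀ l : Int,
      (PySem.List.pyRange l i 1).foldl (fun r j => r + (PySem.List.pyGetD key j 0 + 3 + j)) 0
        = pvS i key l := by
    intro l
    rw [PySem.List.foldl_add (g := fun j => PySem.List.pyGetD key j 0 + 3 + j)]
    unfold pvS; ring
  simp only [hinner]
  norm_num

-- B's loop invariant: starting from running = pvS i key k and walking k-1, …, 0
theorem portB_loop (i : Int) (key : List Int) (n : Int) :
    ∀ (k : Nat), (k : Int) ≤ i → ∀ (out : List Int),
      (PySem.List.pyRange ((k : Int) - 1) (-1) (-1)).foldl
        (fun (p : List Int × Int) l =>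
          let running := p.2 + (PySem.List.pyGetD key l 0 + 3 + l)
          (p.1 ++ [PySem.Int.mod (-3 - i - running) n], running)) (out, pvS i key k)
      = (out ++ (PySem.List.pyRange ((k : Int) - 1) (-1) (-1)).map
            (fun l => PySem.Int.mod (-3 - i - pvS i key l) n), pvS i key 0) := by
  intro k
  induction k with
  | zero =>
      intro _ out
      rw [PySem.List.pyRange_neg_one_eq_nil (by norm_num)]
      simp
  | succ m ih =>
      intro hk out
      have hm : ((m : Nat) : Int) < i := by push_cast at hk ⊢; omega
      have hstep : pvS i key ((m : Nat) + 1) + (PySem.List.pyGetD key (m : Nat) 0 + 3 + (m : Nat))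
          = pvS i key (m : Nat) := by
        rw [pvS_cons i key (m : Nat) hm]; ring
      rw [show (((m + 1 : Nat) : Int) - 1) = ((m : Nat) + 1 : Int) - 1 + 0 by push_cast; ring]
      rw [show ((m : Nat) + 1 : Int) - 1 + 0 = ((m : Nat) : Int) by ring]
      rw [PySem.List.pyRange_neg_one_cons (a := ((m : Nat) : Int)) (by omega)]
      simp only [List.foldl_cons, List.map_cons]
      rw [show pvS i key ((m : Nat) + 1 : Nat) = pvS i key (((m : Nat) : Int) + 1) by push_cast; rfl]
      rw [hstep]
      rw [ih (by push_cast at hk ⊢; omega) (out ++ [PySem.Int.mod (-3 - i - pvS i key (m : Nat)) n])]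
      simp

theorem portB_eq (i : Int) (key : List Int) (n : Int) :
    handle_strong_key_bytes_alt i key n =
      PySem.Int.mod (-3 - i) n ::
        (PySem.List.pyRange 0 i 1).map (fun l => PySem.Int.mod (-3 - i - pvS i key l) n) := by
  unfold handle_strong_key_bytes_alt
  by_cases hi : 0 ≤ i
  · have hk : ((i.toNat : Nat) : Int) = i := Int.toNat_of_nonneg hi
    have h0 : pvS i key (i.toNat : Nat) = 0 := by
      unfold pvS
      rw [hk, PySem.List.pyRange_one_eq_nil (by omega)]
      simp
    have := portB_loop i key n i.toNat (by omega) []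
    rw [h0] at this
    rw [show (i - 1) = ((i.toNat : Nat) : Int) - 1 by omega, this]
    simp only [List.nil_append]
    rw [PySem.List.pyRange_neg_one_eq_reverse]
    rw [show (-1 : Int) + 1 = 0 by ring, show ((i.toNat : Nat) : Int) - 1 + 1 = i by omega]
    simp
  · rw [PySem.List.pyRange_neg_one_eq_nil (by omega),
        PySem.List.pyRange_one_eq_nil (by omega)]
    simp

-- ===== VERDICT (by name: the statement is the Claim_ definition above) =====
theorem handle_strong_key_bytes_spec : Claim_equal_handle_strong_key_bytes := by
  intro i key n _ _
  unfold Spec_handle_strong_key_bytes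
  rw [portA_eq, portB_eq]
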